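-- pv_equiv track=rewrite | github.com/mabrasheva/SoftUni-Fundamentals-Python | Lists_Advanced/social_distribution.py | equal_distribution
-- ===== SOURCE A (Python) =====
-- def equal_distribution(numbers_list, wealth_number):
--     min_number = min(numbers_list)
--     max_number = max(numbers_list)
--
--     while wealth_number > min_number:
--         min_number_index = numbers_list.index(min_number)
--         max_number_index = numbers_list.index(max_number)
--
--         diff = wealth_number - min_number
--         numbers_list[min_number_index] += diff
--         numbers_list[max_number_index] -= diff
--
--         min_number = min(numbers_list)
--         max_number = max(numbers_list)
--
--     return numbers_list
-- ===== SOURCE B (Python) =====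
-- def _lower(pairs, key):
--     # first position whose pair is >= key, in a lexicographically sorted list
--     lo, hi = 0, len(pairs)
--     while lo < hi:
--         mid = (lo + hi) // 2
--         if pairs[mid] < key:
--             lo = mid + 1
--         else:
--             hi = mid
--     return lo
--
--
-- def equal_distribution(numbers_list, wealth_number):
--     # Keep the multiset as a lexicographically sorted list of (value, index) pairs,
--     # built once by binary insertion and maintained across iterations:
--     # the minimum (with smallest index) is the head, the maximum with smallest
--     # index is found by binary search; values are written back at the end.
--     pairs = []
--     for i, v in enumerate(numbers_list):
--         pairs.insert(_lower(pairs, (v, i)), (v, i))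
--     while True:
--         mn, mni = pairs[0]
--         if wealth_number <= mn:
--             break
--         lb = _lower(pairs, (pairs[-1][0], 0))
--         mxv, mxi = pairs[lb]
--         diff = wealth_number - mn
--         pairs.pop(lb)
--         pairs.pop(0)
--         pairs.insert(_lower(pairs, (wealth_number, mni)), (wealth_number, mni))
--         pairs.insert(_lower(pairs, (mxv - diff, mxi)), (mxv - diff, mxi))
--     for v, i in pairs:
--         numbers_list[i] = v
--     return numbers_list
-- ===== Notes on version B (the rewrite author's own statement) =====
-- stated objective: alternative
-- what changed: Instead of rescanning the list with min/max/.index every iteration, B builds a lexicographically sorted list of (value,index) pairs once by binary insertion and maintains it: the minimum with smallest index is the head, the first maximal pair is found by binary search, each step removes/reinserts two pairs at their sorted positions, and values are written back at the end.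
-- outside the precondition, e.g. on equal_distribution([], 5): A raises ValueError, B raises IndexError
import Mathlib
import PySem

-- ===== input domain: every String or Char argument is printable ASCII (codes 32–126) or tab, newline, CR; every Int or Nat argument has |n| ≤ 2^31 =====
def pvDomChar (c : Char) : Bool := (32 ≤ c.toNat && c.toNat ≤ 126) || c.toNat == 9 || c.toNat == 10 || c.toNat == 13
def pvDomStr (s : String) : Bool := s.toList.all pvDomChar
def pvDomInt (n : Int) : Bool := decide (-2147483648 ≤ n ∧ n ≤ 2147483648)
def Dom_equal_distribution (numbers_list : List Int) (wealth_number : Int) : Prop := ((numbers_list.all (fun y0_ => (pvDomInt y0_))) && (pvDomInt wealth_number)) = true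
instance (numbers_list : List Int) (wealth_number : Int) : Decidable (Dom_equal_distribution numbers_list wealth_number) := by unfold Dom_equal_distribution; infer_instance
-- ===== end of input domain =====

-- B replaces A's per-iteration min/max/.index scans by a lexicographically sorted list of
-- (value, index) pairs, built once by binary insertion and maintained across iterations
-- (head = minimum with smallest index, first maximal pair found by binary search), with the
-- values written back at the end.  Return-value equivalence is what is proved; both Pythons
-- mutate the argument list in place identically.

-- Fuel bound for both while-loops (a totality guard only, never reached on Pre_ inputs:
-- the total deficit Σ max(w - a, 0) strictly decreases every iteration while the loop runs).
def pvFuel (nl : List Int) (w : Int) : Nat :=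
  ((nl.map (fun a => max (w - a) 0)).sum).toNat + 1

-- ===== PORT A =====
-- the while-loop of A; mn/mx carry min(numbers_list)/max(numbers_list).
-- indices returned by .index() are valid Nat positions, so List.set/getD are exact
-- for Python's nl[i] += … / nl[j] -= … here.
def eqLoopA (fuel : Nat) (w : Int) (nl : List Int) (mn mx : Int) : List Int :=
  match fuel with
  | 0 => nl
  | Nat.succ f =>
    if w > mn then
      let i := (PySem.List.index? nl mn).getD 0
      let j := (PySem.List.index? nl mx).getD 0
      let diff := w - mn
      let nl1 := nl.set i (nl.getD i 0 + diff)
      let nl2 := nl1.set j (nl1.getD j 0 - diff)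
      match PySem.List.min? nl2 (fun y => y), PySem.List.max? nl2 (fun y => y) with
      | some mn2, some mx2 => eqLoopA f w nl2 mn2 mx2
      | _, _ => nl2
    else nl

def equal_distribution (numbers_list : List Int) (wealth_number : Int) : List Int :=
  match PySem.List.min? numbers_list (fun y => y), PySem.List.max? numbers_list (fun y => y) with
  | some mn, some mx => eqLoopA (pvFuel numbers_list wealth_number) wealth_number numbers_list mn mx
  | _, _ => []  -- min([]) raises ValueError; excluded by Pre_

-- ===== PORT B =====
-- Python tuple comparison (v, i) < (v', i') is lexicographic
def pairLt (a b : Int × Int) : Bool := a.1 < b.1 || (a.1 == b.1 && a.2 < b.2)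

-- _lower(pairs, key): binary search for the first position whose pair is >= key
def lowerGo (pairs : List (Int × Int)) (key : Int × Int) (lo hi : Nat) : Nat :=
  if h : lo < hi then
    if pairLt (pairs.getD ((lo + hi) / 2) (0, 0)) key then lowerGo pairs key ((lo + hi) / 2 + 1) hi
    else lowerGo pairs key lo ((lo + hi) / 2)
  else lo
termination_by hi - lo
decreasing_by all_goals omega

def lower (pairs : List (Int × Int)) (key : Int × Int) : Nat := lowerGo pairs key 0 pairs.length

-- the 'while True' loop of B: read the head, test exit, locate the first maximal pair by
-- binary search, remove both pairs and reinsert their replacements at their sorted positions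
def eqGoB (fuel : Nat) (w : Int) (pairs : List (Int × Int)) : List (Int × Int) :=
  match fuel with
  | 0 => pairs
  | Nat.succ f =>
    match pairs with
    | [] => []  -- pairs[0] raises IndexError; excluded by Pre_
    | (mn, mni) :: _ =>
      if w ≤ mn then pairs
      else
        let lb := lower pairs (((pairs.getLast?.map Prod.fst).getD 0), 0)
        let q := pairs.getD lb (0, 0)
        let diff := w - mn
        let p2 := (pairs.eraseIdx lb).eraseIdx 0
        let p3 := p2.insertIdx (lower p2 (w, mni)) (w, mni)
        let p4 := p3.insertIdx (lower p3 (q.1 - diff, q.2)) (q.1 - diff, q.2)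
        eqGoB f w p4

def equal_distribution_alt (numbers_list : List Int) (wealth_number : Int) : List Int :=
  -- pairs built once by binary insertion over enumerate(numbers_list)
  let pairs := numbers_list.zipIdx.foldl
    (fun ps p => ps.insertIdx (lower ps (p.1, (p.2 : Int))) (p.1, (p.2 : Int))) []
  let pf := eqGoB (pvFuel numbers_list wealth_number) wealth_number pairs
  -- write-back: indices stored in pairs are positions 0 ≤ i < len, so set/toNat is exact
  pf.foldl (fun acc p => acc.set p.2.toNat p.1) numbers_list

-- ===== PRECONDITION & SPEC =====
-- Pre_ excludes the empty list (A raises ValueError) and the inputs with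
-- sum < len * wealth on which A's while-loop never terminates (no return value).
def Pre_equal_distribution (numbers_list : List Int) (wealth_number : Int) : Prop :=
  numbers_list ≠ [] ∧ (numbers_list.length : Int) * wealth_number ≤ numbers_list.sum
instance (numbers_list : List Int) (wealth_number : Int) : Decidable (Pre_equal_distribution numbers_list wealth_number) := by unfold Pre_equal_distribution; infer_instance

def pvWitness_equal_distribution : List Int × Int := ([3, 0, 7, 9, 9, 3], 5)

def Spec_equal_distribution (numbers_list : List Int) (wealth_number : Int) (out : List Int) : Prop := out = equal_distribution_alt numbers_list wealth_number
instance (numbers_list : List Int) (wealth_number : Int) (out : List Int) : Decidable (Spec_equal_distribution numbers_list wealth_number out) := by unfold Spec_equal_distribution; infer_instance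

-- ===== CLAIM (what is proved, stated in full; the proofs are below) =====
def Claim_equal_equal_distribution : Prop := ∀ (numbers_list : List Int) (wealth_number : Int), Dom_equal_distribution numbers_list wealth_number → Pre_equal_distribution numbers_list wealth_number → Spec_equal_distribution numbers_list wealth_number (equal_distribution numbers_list wealth_number)

-- ===== LEMMAS AND PROOFS =====

lemma pairLt_iff (a b : Int × Int) : pairLt a b = true ↔ (a.1 < b.1 ∨ (a.1 = b.1 ∧ a.2 < b.2)) := by
  simp [pairLt]

lemma pairLt_trans {a b c : Int × Int} (h1 : pairLt a b = true) (h2 : pairLt b c = true) :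
    pairLt a c = true := by
  rw [pairLt_iff] at *; omega

lemma getD_eq_getElem' (ps : List (Int × Int)) (j : Nat) (h : j < ps.length) :
    ps.getD j (0, 0) = ps[j] := List.getD_eq_getElem ps (0, 0) h

lemma pairwise_lt_getElem {ps : List (Int × Int)}
    (hs : ps.Pairwise (fun a b => pairLt a b = true)) {i j : Nat}
    (hi : i < ps.length) (hj : j < ps.length) (hij : i < j) : pairLt ps[i] ps[j] = true := by
  exact List.pairwise_iff_getElem.1 hs i j hi hj hij

lemma lowerGo_spec (ps : List (Int × Int)) (key : Int × Int)
    (hs : ps.Pairwise (fun a b => pairLt a b = true)) :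
    ∀ (n lo hi : Nat), hi - lo = n → hi ≤ ps.length → lo ≤ hi →
    (∀ j, j < lo → pairLt (ps.getD j (0, 0)) key = true) →
    (∀ j, hi ≤ j → j < ps.length → pairLt (ps.getD j (0, 0)) key = false) →
    lowerGo ps key lo hi ≤ ps.length ∧
    (∀ j, j < lowerGo ps key lo hi → pairLt (ps.getD j (0, 0)) key = true) ∧
    (∀ j, lowerGo ps key lo hi ≤ j → j < ps.length → pairLt (ps.getD j (0, 0)) key = false) := by
  intro n
  induction n using Nat.strong_induction_on with
  | _ n ih =>
    intro lo hi hn hhi hlohi hbef haft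
    rw [lowerGo]
    split_ifs with hlt hm
    · -- recurse right half
      have hmidlt : (lo + hi) / 2 < ps.length := by omega
      refine ih (hi - ((lo + hi) / 2 + 1)) (by omega) ((lo + hi) / 2 + 1) hi rfl hhi (by omega) ?_ haft
      intro j hj
      by_cases hjlo : j < lo
      · exact hbef j hjlo
      · have hjlen : j < ps.length := by omega
        by_cases hje : j = (lo + hi) / 2
        · subst hje; exact hm
        · have : pairLt ps[j] ps[(lo + hi) / 2] = true :=
            pairwise_lt_getElem hs hjlen hmidlt (by omega)
          rw [getD_eq_getElem' ps j hjlen]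
          rw [getD_eq_getElem' ps _ hmidlt] at hm
          exact pairLt_trans this hm
    · -- recurse left half
      have hmidlt : (lo + hi) / 2 < ps.length := by omega
      refine ih ((lo + hi) / 2 - lo) (by omega) lo ((lo + hi) / 2) rfl (by omega) (by omega) hbef ?_
      intro j hj hjlen
      by_cases hje : j = (lo + hi) / 2
      · subst hje; exact Bool.eq_false_iff.mpr (fun hc => hm hc)
      · by_cases hjhi : hi ≤ j
        · exact haft j hjhi hjlen
        · -- mid < j < hi
          rw [getD_eq_getElem' ps j hjlen]
          apply Bool.eq_false_iff.mpr
          intro hc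
          have : pairLt ps[(lo + hi) / 2] ps[j] = true :=
            pairwise_lt_getElem hs hmidlt hjlen (by omega)
          rw [getD_eq_getElem' ps _ hmidlt] at hm
          exact hm (pairLt_trans this hc)
    · exact ⟨by omega, fun j hj => hbef j (by omega), fun j hj hjl => haft j (by omega) hjl⟩

lemma lower_spec (ps : List (Int × Int)) (key : Int × Int)
    (hs : ps.Pairwise (fun a b => pairLt a b = true)) :
    lower ps key ≤ ps.length ∧
    (∀ j, j < lower ps key → pairLt (ps.getD j (0, 0)) key = true) ∧
    (∀ j, lower ps key ≤ j → j < ps.length → pairLt (ps.getD j (0, 0)) key = false) := by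
  exact lowerGo_spec ps key hs ps.length 0 ps.length rfl le_rfl (Nat.zero_le _)
    (by omega) (by omega)

lemma pairwise_insertIdx (x : Int × Int) :
    ∀ (ps : List (Int × Int)) (n : Nat), n ≤ ps.length →
    ps.Pairwise (fun a b => pairLt a b = true) →
    (∀ j (h : j < ps.length), j < n → pairLt ps[j] x = true) →
    (∀ j (h : j < ps.length), n ≤ j → pairLt x ps[j] = true) →
    (ps.insertIdx n x).Pairwise (fun a b => pairLt a b = true) := by
  intro ps
  induction ps with
  | nil =>
    intro n hn _ _ _
    have : n = 0 := by simpa using hn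
    subst this
    simp
  | cons a t ih =>
    intro n hn hp hbef haft
    cases n with
    | zero =>
      simp only [List.insertIdx_zero]
      refine List.pairwise_cons.2 ⟨?_, hp⟩
      intro y hy
      rw [List.mem_iff_getElem] at hy
      obtain ⟨j, hj, rfl⟩ := hy
      exact haft j hj (Nat.zero_le _)
    | succ m =>
      simp only [List.insertIdx_succ_cons]
      rw [List.pairwise_cons] at hp
      refine List.pairwise_cons.2 ⟨?_, ?_⟩
      · intro y hy
        rcases List.eq_or_mem_of_mem_insertIdx hy with rfl | hyt
        · exact hbef 0 (by simp) (by omega)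
        · exact hp.1 y hyt
      · refine ih m (by simpa using hn) hp.2 ?_ ?_
        · intro j hj hjm
          exact hbef (j + 1) (by simpa using hj) (by omega)
        · intro j hj hjm
          exact haft (j + 1) (by simpa using hj) (by omega)

lemma insert_lower (ps : List (Int × Int)) (key : Int × Int)
    (hs : ps.Pairwise (fun a b => pairLt a b = true)) (hnm : key ∉ ps) :
    (ps.insertIdx (lower ps key) key).Pairwise (fun a b => pairLt a b = true) ∧
    (ps.insertIdx (lower ps key) key).Perm (key :: ps) := by
  obtain ⟨hle, hbef, haft⟩ := lower_spec ps key hs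
  constructor
  · refine pairwise_insertIdx key ps (lower ps key) hle hs ?_ ?_
    · intro j hj hjn
      rw [← getD_eq_getElem' ps j hj]
      exact hbef j hjn
    · intro j hj hjn
      have hf := haft j hjn hj
      rw [getD_eq_getElem' ps j hj] at hf
      have htri : pairLt ps[j] key = true ∨ ps[j] = key ∨ pairLt key ps[j] = true := by
        obtain ⟨a1, a2⟩ := (ps[j] : Int × Int)
        obtain ⟨b1, b2⟩ := key
        simp only [pairLt_iff, Prod.mk.injEq]
        omega
      rcases htri with h | h | h
      · rw [hf] at h; exact absurd h (by simp)
      · exact absurd (h ▸ List.getElem_mem hj) hnm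
      · exact h
  · exact List.perm_insertIdx key ps hle

def enumP (nl : List Int) : List (Int × Int) := nl.zipIdx.map (fun p => (p.1, (p.2 : Int)))

lemma mem_enumP {nl : List Int} {p : Int × Int} :
    p ∈ enumP nl ↔ ∃ (j : Nat) (h : j < nl.length), p = (nl[j], (j : Int)) := by
  constructor
  · intro h
    rw [List.mem_iff_getElem] at h
    obtain ⟨j, hj, he⟩ := h
    simp [enumP] at hj
    refine ⟨j, hj, ?_⟩
    simp [enumP] at he
    exact he.symm
  · rintro ⟨j, hj, rfl⟩
    rw [List.mem_iff_getElem]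
    exact ⟨j, by simp [enumP, hj], by simp [enumP]⟩

lemma enumP_nodup (nl : List Int) : (enumP nl).Nodup := by
  rw [List.nodup_iff_getElem?_ne_getElem?]
  intro i j hij hj
  simp [enumP] at hj ⊢
  intro h
  have h1 : i < nl.length := by omega
  simp [List.getElem?_eq_getElem, h1, hj] at h ⊢
  omega

lemma perm_getElem_cons_eraseIdx {α : Type} (l : List α) (i : Nat) (h : i < l.length) :
    l.Perm (l[i] :: l.eraseIdx i) := by
  induction l generalizing i with
  | nil => simp at h
  | cons a t ih =>
    cases i with
    | zero => simp
    | succ m =>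
      simp only [List.length_cons] at h
      have hm : m < t.length := by omega
      have h1 : (a :: t).Perm (a :: t[m] :: t.eraseIdx m) := List.Perm.cons a (ih m hm)
      have h2 : (a :: t[m] :: t.eraseIdx m).Perm (t[m] :: a :: t.eraseIdx m) := List.Perm.swap _ _ _
      simpa using h1.trans h2

lemma sum_set (l : List Int) (i : Nat) (v : Int) (h : i < l.length) :
    (l.set i v).sum = l.sum - l[i] + v := by
  induction l generalizing i with
  | nil => simp at h
  | cons a t ih =>
    cases i with
    | zero => simp [List.sum_cons]; ring
    | succ m =>
      simp only [List.set_cons_succ, List.sum_cons, List.getElem_cons_succ]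
      rw [ih m (by simpa using h)]
      ring

lemma sum_le_len_mul {l : List Int} {c : Int} (h : ∀ x ∈ l, x ≤ c) :
    l.sum ≤ (l.length : Int) * c := by
  induction l with
  | nil => simp
  | cons a t ih =>
    simp only [List.sum_cons, List.length_cons]
    have := ih (fun x hx => h x (List.mem_cons_of_mem a hx))
    have := h a (List.mem_cons_self)
    push_cast
    nlinarith

lemma perm_mem_enumP {nl : List Int} {ps : List (Int × Int)} (hp : ps.Perm (enumP nl))
    {p : Int × Int} (h : p ∈ ps) : ∃ (j : Nat) (hj : j < nl.length), p = (nl[j], (j : Int)) :=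
  mem_enumP.1 (hp.mem_iff.1 h)

lemma head_of_inv {nl : List Int} {ps : List (Int × Int)} {mn : Int}
    (hs : ps.Pairwise (fun a b => pairLt a b = true)) (hp : ps.Perm (enumP nl))
    (hmn : PySem.List.min? nl (fun y => y) = some mn) :
    ∃ mni : Nat, PySem.List.index? nl mn = some mni ∧ ∃ t, ps = (mn, (mni : Int)) :: t := by
  have hmem : mn ∈ nl := PySem.List.min?_mem hmn
  obtain ⟨mni, hidx⟩ := Option.isSome_iff_exists.1 ((PySem.List.index?_isSome_iff nl mn).2 hmem)
  obtain ⟨hkl, hget, hminidx⟩ := PySem.List.getElem_of_index?_eq_some hidx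
  have hmem_e : (mn, (mni : Int)) ∈ ps := hp.mem_iff.2 (mem_enumP.2 ⟨mni, hkl, by rw [hget]⟩)
  refine ⟨mni, hidx, ?_⟩
  cases ps with
  | nil => simp at hmem_e
  | cons h t =>
    rcases List.mem_cons.1 hmem_e with he | ht
    · exact ⟨t, by rw [he]⟩
    · exfalso
      have hlt : pairLt h (mn, (mni : Int)) = true :=
        (List.pairwise_cons.1 hs).1 _ ht
      obtain ⟨j, hj, rfl⟩ := perm_mem_enumP hp List.mem_cons_self
      rw [pairLt_iff] at hlt
      simp only at hlt
      have hge : mn ≤ nl[j] := PySem.List.min?_isMin hmn _ (List.getElem_mem hj)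
      rcases hlt with h1 | ⟨h1, h2⟩
      · omega
      · have hjlt : j < mni := by omega
        exact hminidx j hjlt h1

lemma last_of_inv {nl : List Int} {ps : List (Int × Int)} {mx : Int}
    (hs : ps.Pairwise (fun a b => pairLt a b = true)) (hp : ps.Perm (enumP nl))
    (hmx : PySem.List.max? nl (fun y => y) = some mx) :
    (ps.getLast?.map Prod.fst).getD 0 = mx := by
  have hmem : mx ∈ nl := PySem.List.max?_mem hmx
  obtain ⟨jm, hjm, hgm⟩ := List.mem_iff_getElem.1 hmem
  have hmem_e : (mx, (jm : Int)) ∈ ps := hp.mem_iff.2 (mem_enumP.2 ⟨jm, hjm, by rw [hgm]⟩)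
  have hne : ps ≠ [] := by rintro rfl; simp at hmem_e
  have hlen : 0 < ps.length := List.length_pos_iff.2 hne
  have hlast : ps.getLast? = some ps[ps.length - 1] := by
    rw [List.getLast?_eq_getElem?, List.getElem?_eq_getElem (by omega)]
  rw [hlast]
  simp only [Option.map_some, Option.getD_some]
  -- ps[len-1].1 = mx
  obtain ⟨j, hj, hpe⟩ := perm_mem_enumP hp (List.getElem_mem (by omega : ps.length - 1 < ps.length))
  have hle : nl[j] ≤ mx := PySem.List.max?_isMax hmx _ (List.getElem_mem hj)
  obtain ⟨t, ht, hte⟩ := List.mem_iff_getElem.1 hmem_e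
  by_cases htl : t = ps.length - 1
  · subst htl; rw [hte]
  · have hlt : pairLt ps[t] ps[ps.length - 1] = true :=
      pairwise_lt_getElem hs ht (by omega) (by omega)
    rw [hte, hpe] at hlt
    rw [pairLt_iff] at hlt
    simp only at hlt
    rw [hpe]
    simp only
    omega

lemma maxpos_of_inv {nl : List Int} {ps : List (Int × Int)} {mx : Int}
    (hs : ps.Pairwise (fun a b => pairLt a b = true)) (hp : ps.Perm (enumP nl))
    (hmx : PySem.List.max? nl (fun y => y) = some mx) :
    ∃ mxi : Nat, PySem.List.index? nl mx = some mxi ∧ lower ps (mx, 0) < ps.length ∧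
      ps.getD (lower ps (mx, 0)) (0, 0) = (mx, (mxi : Int)) := by
  have hmem : mx ∈ nl := PySem.List.max?_mem hmx
  obtain ⟨mxi, hidx⟩ := Option.isSome_iff_exists.1 ((PySem.List.index?_isSome_iff nl mx).2 hmem)
  obtain ⟨hkl, hget, hminidx⟩ := PySem.List.getElem_of_index?_eq_some hidx
  have hmem_e : (mx, (mxi : Int)) ∈ ps := hp.mem_iff.2 (mem_enumP.2 ⟨mxi, hkl, by rw [hget]⟩)
  obtain ⟨t, ht, hte⟩ := List.mem_iff_getElem.1 hmem_e
  obtain ⟨hle, hbef, haft⟩ := lower_spec ps (mx, 0) hs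
  set r := lower ps (mx, 0) with hr
  -- the entry (mx, mxi) is not < (mx, 0), so it sits at position ≥ r
  have htr : r ≤ t := by
    by_contra hc
    have := hbef t (by omega)
    rw [getD_eq_getElem' ps t ht, hte] at this
    rw [pairLt_iff] at this
    simp only at this
    omega
  have hrlen : r < ps.length := by omega
  refine ⟨mxi, hidx, hrlen, ?_⟩
  rw [getD_eq_getElem' ps r hrlen]
  -- ps[r] is ≥ (mx,0) but its value is ≤ mx, so its value is mx and its index ≥ 0
  have hfa := haft r le_rfl hrlen
  rw [getD_eq_getElem' ps r hrlen] at hfa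
  obtain ⟨j, hj, hpe⟩ := perm_mem_enumP hp (List.getElem_mem hrlen)
  have hjle : nl[j] ≤ mx := PySem.List.max?_isMax hmx _ (List.getElem_mem hj)
  have hval : nl[j] = mx := by
    rw [hpe, Bool.eq_false_iff, ne_eq, pairLt_iff] at hfa
    simp only at hfa
    omega
  -- minimality of mxi: j ≥ mxi
  have hjge : mxi ≤ j := by
    by_contra hc
    exact hminidx j (by omega) hval
  -- position of (mx,mxi) is exactly r: otherwise sortedness is violated
  have : t = r := by
    by_contra hc
    have hlt : pairLt ps[r] ps[t] = true := pairwise_lt_getElem hs hrlen ht (by omega)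
    rw [hpe, hte, pairLt_iff] at hlt
    simp only at hlt
    omega
  subst this
  exact hte

lemma perm_update {nl : List Int} {p2 : List (Int × Int)} {mn mx v1 v2 : Int} {mni mxi : Nat}
    (hmni : mni < nl.length) (hmxi : mxi < nl.length) (hne : mni ≠ mxi)
    (hgmn : nl[mni] = mn) (hgmx : nl[mxi] = mx)
    (hperm : (enumP nl).Perm ((mn, (mni : Int)) :: (mx, (mxi : Int)) :: p2))
    (hv1 : v1 ≠ mn) (hv2 : v2 ≠ mx) :
    (enumP ((nl.set mni v1).set mxi v2)).Perm ((v2, (mxi : Int)) :: (v1, (mni : Int)) :: p2) := by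
  have hnd : ((mn, (mni : Int)) :: (mx, (mxi : Int)) :: p2).Nodup := hperm.nodup (enumP_nodup nl)
  have hndp2 : p2.Nodup := (List.nodup_cons.1 (List.nodup_cons.1 hnd).2).2
  have hmem_p2 : ∀ p ∈ p2, p ∈ enumP nl := by
    intro p hp
    exact hperm.mem_iff.2 (List.mem_cons_of_mem _ (List.mem_cons_of_mem _ hp))
  have hsub : ∀ {p : Int × Int}, p ∈ p2 → ∃ (j : Nat) (hj : j < nl.length), p = (nl[j], (j : Int)) :=
    fun hp => mem_enumP.1 (hmem_p2 _ hp)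
  have hlen2 : ((nl.set mni v1).set mxi v2).length = nl.length := by simp
  -- getElem of the twice-set list
  have hget2 : ∀ (j : Nat) (hj : j < nl.length),
      ((nl.set mni v1).set mxi v2)[j]'(by omega) =
        (if j = mxi then v2 else if j = mni then v1 else nl[j]) := by
    intro j hj
    rw [List.getElem_set, List.getElem_set]
    by_cases h1 : j = mxi <;> by_cases h2 : j = mni <;> simp [h1, h2] <;> omega
  have hnin1 : (v1, (mni : Int)) ∉ p2 := by
    intro hc
    obtain ⟨j, hj, he⟩ := hsub hc
    have h1 : j = mni := by rw [Prod.mk.injEq] at he; omega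
    subst h1
    rw [Prod.mk.injEq] at he
    exact hv1 (by rw [he.1, hgmn])
  have hnin2 : (v2, (mxi : Int)) ∉ p2 := by
    intro hc
    obtain ⟨j, hj, he⟩ := hsub hc
    have h1 : j = mxi := by rw [Prod.mk.injEq] at he; omega
    subst h1
    rw [Prod.mk.injEq] at he
    exact hv2 (by rw [he.1, hgmx])
  have hmn_nin : (mn, (mni : Int)) ∉ (mx, (mxi : Int)) :: p2 := (List.nodup_cons.1 hnd).1
  have hmx_nin : (mx, (mxi : Int)) ∉ p2 := (List.nodup_cons.1 (List.nodup_cons.1 hnd).2).1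
  apply (List.perm_ext_iff_of_nodup (enumP_nodup _) ?_).2
  · intro p
    rw [mem_enumP]
    constructor
    · rintro ⟨j, hj, rfl⟩
      rw [hlen2] at hj
      rw [hget2 j hj]
      by_cases h1 : j = mxi
      · subst h1; simp
      · by_cases h2 : j = mni
        · subst h2; simp [h1]
        · have hpe : ((if j = mxi then v2 else if j = mni then v1 else nl[j]), (j : Int)) = (nl[j], (j : Int)) := by
            simp [h1, h2]
          rw [hpe]
          have hmem : (nl[j], (j : Int)) ∈ enumP nl := mem_enumP.2 ⟨j, hj, rfl⟩
          have := hperm.mem_iff.1 hmem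
          rcases List.mem_cons.1 this with he | this
          · exfalso; rw [Prod.mk.injEq] at he; exact h2 (by omega)
          rcases List.mem_cons.1 this with he | this
          · exfalso; rw [Prod.mk.injEq] at he; exact h1 (by omega)
          · exact List.mem_cons_of_mem _ (List.mem_cons_of_mem _ this)
    · intro hp
      rcases List.mem_cons.1 hp with rfl | hp'
      · exact ⟨mxi, by omega, by rw [hget2 mxi hmxi]; simp⟩
      rcases List.mem_cons.1 hp' with rfl | hp2
      · refine ⟨mni, by omega, ?_⟩
        rw [hget2 mni hmni]
        simp [hne]
      · obtain ⟨j, hj, rfl⟩ := hsub hp2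
        refine ⟨j, by omega, ?_⟩
        rw [hget2 j hj]
        have h1 : j ≠ mxi := by
          intro hc
          apply hmx_nin
          have : (nl[j], (j : Int)) = (mx, (mxi : Int)) := by
            subst hc; rw [Prod.mk.injEq]; exact ⟨hgmx, rfl⟩
          rwa [this] at hp2
        have h2 : j ≠ mni := by
          intro hc
          apply hmn_nin
          apply List.mem_cons_of_mem
          have : (nl[j], (j : Int)) = (mn, (mni : Int)) := by
            subst hc; rw [Prod.mk.injEq]; exact ⟨hgmn, rfl⟩
          rwa [this] at hp2
        simp [h1, h2]
  · -- RHS nodup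
    refine List.nodup_cons.2 ⟨?_, List.nodup_cons.2 ⟨hnin1, hndp2⟩⟩
    intro hc
    rcases List.mem_cons.1 hc with he | hc
    · rw [Prod.mk.injEq] at he; exact hne (by omega)
    · exact hnin2 hc
-- Fuel bound for both while-loops (a totality guard only, never reached on Pre_ inputs:
-- the total deficit Σ max(w - a, 0) strictly decreases every iteration while the loop runs).

lemma eqLoopA_length (fuel : Nat) (w : Int) :
    ∀ (nl : List Int) (mn mx : Int), (eqLoopA fuel w nl mn mx).length = nl.length := by
  induction fuel with
  | zero => intro nl mn mx; rfl
  | succ f ih =>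
    intro nl mn mx
    simp only [eqLoopA]
    split_ifs with hw
    · split
      · rw [ih]; simp
      · simp
    · rfl

lemma loopAB (fuel : Nat) : ∀ (w : Int) (nl : List Int) (ps : List (Int × Int)) (mn mx : Int),
    ps.Pairwise (fun a b => pairLt a b = true) → ps.Perm (enumP nl) →
    PySem.List.min? nl (fun y => y) = some mn →
    PySem.List.max? nl (fun y => y) = some mx →
    (nl.length : Int) * w ≤ nl.sum →
    (eqGoB fuel w ps).Pairwise (fun a b => pairLt a b = true) ∧
    (eqGoB fuel w ps).Perm (enumP (eqLoopA fuel w nl mn mx)) := by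
  induction fuel with
  | zero => intro w nl ps mn mx hs hp _ _ _; exact ⟨hs, hp⟩
  | succ f ih =>
    intro w nl ps mn mx hs hp hmn hmx hsum
    obtain ⟨mni, hidxmn, t, rfl⟩ := head_of_inv hs hp hmn
    by_cases hw : w ≤ mn
    · -- both loops stop
      rw [eqGoB, eqLoopA, if_neg (by omega : ¬ w > mn), if_pos hw]
      exact ⟨hs, hp⟩
    · push_neg at hw   -- hw : mn < w
      -- basic facts about nl
      have hnl_ne : nl ≠ [] := by
        intro hc
        rw [hc, (PySem.List.min?_eq_none_iff [] _).2 rfl] at hmn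
        simp at hmn
      have hlen_pos : 0 < nl.length := List.length_pos_iff.2 hnl_ne
      have hsum_le : nl.sum ≤ (nl.length : Int) * mx :=
        sum_le_len_mul (fun x hx => PySem.List.max?_isMax hmx x hx)
      have hwmx : w ≤ mx := by
        have h1 : (nl.length : Int) * w ≤ (nl.length : Int) * mx := le_trans hsum hsum_le
        exact le_of_mul_le_mul_left h1 (by exact_mod_cast hlen_pos)
      have hmnmx : mn < mx := lt_of_lt_of_le hw hwmx
      -- index facts
      obtain ⟨hmni_lt, hget_mn, _⟩ := PySem.List.getElem_of_index?_eq_some hidxmn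
      obtain ⟨mxi, hidxmx, hlb_lt, hlb_get⟩ := maxpos_of_inv hs hp hmx
      obtain ⟨hmxi_lt, hget_mx, _⟩ := PySem.List.getElem_of_index?_eq_some hidxmx
      have hne_idx : mni ≠ mxi := by
        intro hc
        subst hc
        exact absurd (hget_mn.symm.trans hget_mx) (by omega)
      have hlast := last_of_inv hs hp hmx
      -- lb ≥ 1 because the head (mn, mni) is < (mx, 0)
      obtain ⟨hle, hbef, haft⟩ := lower_spec ((mn, (mni : Int)) :: t) (mx, 0) hs
      have hlb_pos : 0 < lower ((mn, (mni : Int)) :: t) (mx, 0) := by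
        by_contra hc
        have := haft 0 (by omega) (by simp)
        rw [getD_eq_getElem' _ 0 (by simp)] at this
        simp only [List.getElem_cons_zero] at this
        rw [Bool.eq_false_iff, ne_eq, pairLt_iff] at this
        simp only at this
        omega
      -- A's updated list, in canonical form
      have hgetD_mn : nl.getD mni 0 = mn := by
        rw [List.getD_eq_getElem nl 0 hmni_lt]; exact hget_mn
      have e1 : mn + (w - mn) = w := by ring
      have e2 : (nl.set mni w).getD mxi 0 = mx := by
        rw [List.getD_eq_getElem _ 0 (by simp; omega), List.getElem_set_ne (by omega)]
        exact hget_mx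
      have hlen2 : ((nl.set mni w).set mxi (mx - (w - mn))).length = nl.length := by simp
      have hnl2_ne : (nl.set mni w).set mxi (mx - (w - mn)) ≠ [] := by
        intro hc
        rw [← List.length_eq_zero_iff] at hc
        omega
      -- sum is preserved
      have hsum2 : ((nl.set mni w).set mxi (mx - (w - mn))).sum = nl.sum := by
        have e3 : (nl.set mni w).sum = nl.sum - nl[mni] + w := sum_set nl mni _ hmni_lt
        have e4 : ((nl.set mni w).set mxi (mx - (w - mn))).sum
            = (nl.set mni w).sum - (nl.set mni w)[mxi]'(by simp; omega) + (mx - (w - mn)) :=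
          sum_set _ mxi _ (by simp; omega)
        have e5 : (nl.set mni w)[mxi]'(by simp; omega) = mx := by
          rw [List.getElem_set_ne (by omega)]; exact hget_mx
        rw [e4, e5, e3, hget_mn]
        ring
      -- B's side: the pair list after the two erases
      obtain ⟨k, hk⟩ : ∃ k, lower ((mn, (mni : Int)) :: t) (mx, 0) = k + 1 :=
        ⟨_, (Nat.succ_pred_eq_of_pos hlb_pos).symm⟩
      have hk_lt : k < t.length := by
        have := hlb_lt; rw [hk] at this; simpa using this
      have htk : t[k] = (mx, (mxi : Int)) := by
        have := hlb_get
        rw [hk, getD_eq_getElem' _ (k + 1) (by simpa using hk_lt)] at this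
        simpa using this
      have hp2eq : (((mn, (mni : Int)) :: t).eraseIdx (lower ((mn, (mni : Int)) :: t) (mx, 0))).eraseIdx 0
          = t.eraseIdx k := by
        rw [hk, List.eraseIdx_cons_succ, List.eraseIdx_cons_zero]
      -- permutation: ps ~ (mn,mni) :: (mx,mxi) :: p2
      have hperm_t : t.Perm ((mx, (mxi : Int)) :: t.eraseIdx k) := by
        have := perm_getElem_cons_eraseIdx t k hk_lt
        rwa [htk] at this
      have hperm3 : (enumP nl).Perm ((mn, (mni : Int)) :: (mx, (mxi : Int)) :: t.eraseIdx k) :=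
        hp.symm.trans (List.Perm.cons _ hperm_t)
      -- sortedness of the pieces
      have hs_t : t.Pairwise (fun a b => pairLt a b = true) := (List.pairwise_cons.1 hs).2
      have hs_p2 : (t.eraseIdx k).Pairwise (fun a b => pairLt a b = true) :=
        hs_t.sublist (List.eraseIdx_sublist t k)
      -- fresh keys for the two insertions
      have hsub_p2 : ∀ {p : Int × Int}, p ∈ t.eraseIdx k → p ∈ enumP nl := by
        intro p hpm
        exact hperm3.mem_iff.2 (List.mem_cons_of_mem _ (List.mem_cons_of_mem _ hpm))
      have hnin1 : (w, (mni : Int)) ∉ t.eraseIdx k := by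
        intro hc
        obtain ⟨j, hj, he⟩ := mem_enumP.1 (hsub_p2 hc)
        rw [Prod.mk.injEq] at he
        have hje : j = mni := by omega
        subst hje
        rw [hget_mn] at he
        omega
      obtain ⟨hs_p3, hperm_p3⟩ := insert_lower (t.eraseIdx k) (w, (mni : Int)) hs_p2 hnin1
      have hnin2 : (mx - (w - mn), (mxi : Int)) ∉
          (t.eraseIdx k).insertIdx (lower (t.eraseIdx k) (w, (mni : Int))) (w, (mni : Int)) := by
        intro hc
        rcases List.mem_cons.1 (hperm_p3.mem_iff.1 hc) with he | hc2
        · rw [Prod.mk.injEq] at he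
          exact hne_idx (by omega)
        · obtain ⟨j, hj, he⟩ := mem_enumP.1 (hsub_p2 hc2)
          rw [Prod.mk.injEq] at he
          have hje : j = mxi := by omega
          subst hje
          rw [hget_mx] at he
          omega
      obtain ⟨hs_p4, hperm_p4⟩ := insert_lower _ (mx - (w - mn), (mxi : Int)) hs_p3 hnin2
      -- the new pair list is a sorted permutation of enumP of A's updated list
      have hperm_new : (((t.eraseIdx k).insertIdx (lower (t.eraseIdx k) (w, (mni : Int))) (w, (mni : Int))).insertIdx
            (lower ((t.eraseIdx k).insertIdx (lower (t.eraseIdx k) (w, (mni : Int))) (w, (mni : Int)))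
              (mx - (w - mn), (mxi : Int))) (mx - (w - mn), (mxi : Int))).Perm
          (enumP ((nl.set mni w).set mxi (mx - (w - mn)))) := by
        refine hperm_p4.trans ?_
        have h1 := perm_update hmni_lt hmxi_lt hne_idx hget_mn hget_mx hperm3
          (v1 := w) (v2 := mx - (w - mn)) (by omega) (by omega)
        exact (List.Perm.cons _ hperm_p3).trans h1.symm
      -- min/max of A's updated list exist
      obtain ⟨mn2, hmn2⟩ : ∃ v, PySem.List.min? ((nl.set mni w).set mxi (mx - (w - mn))) (fun y => y) = some v := by
        cases h : PySem.List.min? ((nl.set mni w).set mxi (mx - (w - mn))) (fun y => y) with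
        | none => exact absurd ((PySem.List.min?_eq_none_iff _ _).1 h) hnl2_ne
        | some v => exact ⟨v, rfl⟩
      obtain ⟨mx2, hmx2⟩ : ∃ v, PySem.List.max? ((nl.set mni w).set mxi (mx - (w - mn))) (fun y => y) = some v := by
        cases h : PySem.List.max? ((nl.set mni w).set mxi (mx - (w - mn))) (fun y => y) with
        | none => exact absurd ((PySem.List.max?_eq_none_iff _ _).1 h) hnl2_ne
        | some v => exact ⟨v, rfl⟩
      -- unfold one step of both loops and rewrite into canonical form
      rw [eqGoB, eqLoopA, if_pos (by omega : w > mn), if_neg (by omega : ¬ w ≤ mn)]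
      simp only [hidxmn, hidxmx, Option.getD_some, hgetD_mn, e1, e2, hlast, hlb_get,
        hp2eq, hmn2, hmx2]
      exact ih w ((nl.set mni w).set mxi (mx - (w - mn))) _ mn2 mx2 hs_p4 hperm_new hmn2 hmx2
        (by rw [hlen2, hsum2]; exact hsum)

lemma zipIdx_snd (nl : List Int) :
    nl.zipIdx.map Prod.snd = List.range nl.length := by
  apply List.ext_getElem
  · simp
  · intro i h1 h2
    simp

lemma build_go : ∀ (xs : List (Int × Nat)) (acc : List (Int × Int)),
    acc.Pairwise (fun a b => pairLt a b = true) →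
    (∀ p ∈ xs, ((p.2 : Int)) ∉ acc.map Prod.snd) →
    (xs.map Prod.snd).Nodup →
    (xs.foldl (fun ps p => ps.insertIdx (lower ps (p.1, (p.2 : Int))) (p.1, (p.2 : Int))) acc).Pairwise
      (fun a b => pairLt a b = true) ∧
    (xs.foldl (fun ps p => ps.insertIdx (lower ps (p.1, (p.2 : Int))) (p.1, (p.2 : Int))) acc).Perm
      ((xs.map (fun p => (p.1, (p.2 : Int)))) ++ acc) := by
  intro xs
  induction xs with
  | nil => intro acc hs _ _; exact ⟨hs, by simp⟩
  | cons x rest ih =>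
    intro acc hs hdisj hnd
    have hnm : (x.1, (x.2 : Int)) ∉ acc := by
      intro hc
      exact hdisj x List.mem_cons_self (List.mem_map.2 ⟨_, hc, rfl⟩)
    obtain ⟨hs', hperm'⟩ := insert_lower acc (x.1, (x.2 : Int)) hs hnm
    simp only [List.foldl_cons]
    have hdisj' : ∀ p ∈ rest, ((p.2 : Int)) ∉ (acc.insertIdx (lower acc (x.1, (x.2 : Int))) (x.1, (x.2 : Int))).map Prod.snd := by
      intro p hp hc
      have := (hperm'.map Prod.snd).mem_iff.1 hc
      simp only [List.map_cons] at this
      rcases List.mem_cons.1 this with he | hm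
      · have hx : p.2 = x.2 := by simpa using he
        have hnd2 := hnd
        simp only [List.map_cons, List.nodup_cons] at hnd2
        exact hnd2.1 (hx ▸ List.mem_map.2 ⟨p, hp, rfl⟩)
      · exact hdisj p (List.mem_cons_of_mem _ hp) hm
    have hnd' : (rest.map Prod.snd).Nodup := by
      simp only [List.map_cons, List.nodup_cons] at hnd
      exact hnd.2
    obtain ⟨hsf, hpf⟩ := ih _ hs' hdisj' hnd'
    refine ⟨hsf, hpf.trans ?_⟩
    have hA : ((rest.map (fun p => (p.1, (p.2 : Int)))) ++ acc.insertIdx (lower acc (x.1, (x.2 : Int))) (x.1, (x.2 : Int))).Perm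
        ((rest.map (fun p => (p.1, (p.2 : Int)))) ++ ((x.1, (x.2 : Int)) :: acc)) :=
      List.Perm.append_left _ hperm'
    have hB : ((rest.map (fun p => (p.1, (p.2 : Int)))) ++ ((x.1, (x.2 : Int)) :: acc)).Perm
        ((x.1, (x.2 : Int)) :: ((rest.map (fun p => (p.1, (p.2 : Int)))) ++ acc)) :=
      List.perm_middle
    exact hA.trans (hB.trans (by simp))

lemma build_inv (nl : List Int) :
    (nl.zipIdx.foldl (fun ps p => ps.insertIdx (lower ps (p.1, (p.2 : Int))) (p.1, (p.2 : Int)))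
      ([] : List (Int × Int))).Pairwise (fun a b => pairLt a b = true) ∧
    (nl.zipIdx.foldl (fun ps p => ps.insertIdx (lower ps (p.1, (p.2 : Int))) (p.1, (p.2 : Int)))
      ([] : List (Int × Int))).Perm (enumP nl) := by
  have hnd : (nl.zipIdx.map Prod.snd).Nodup := by
    rw [zipIdx_snd]; exact List.nodup_range
  obtain ⟨h1, h2⟩ := build_go nl.zipIdx [] List.Pairwise.nil (by simp) hnd
  refine ⟨h1, h2.trans ?_⟩
  simp [enumP]

lemma writeback (ps : List (Int × Int)) : ∀ (acc target : List Int),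
    acc.length = target.length →
    (∀ p ∈ ps, 0 ≤ p.2 ∧ p.2.toNat < target.length ∧ target.getD p.2.toNat 0 = p.1) →
    (ps.map Prod.snd).Nodup →
    (∀ j, j < target.length → ((j : Int) ∉ ps.map Prod.snd) → acc.getD j 0 = target.getD j 0) →
    ps.foldl (fun a p => a.set p.2.toNat p.1) acc = target := by
  induction ps with
  | nil =>
    intro acc target hlen _ _ hagree
    apply List.ext_getElem hlen
    intro i h1 h2
    have := hagree i h2 (by simp)
    rwa [List.getD_eq_getElem acc 0 h1, List.getD_eq_getElem target 0 h2] at this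
  | cons p rest ih =>
    intro acc target hlen hmem hnd hagree
    simp only [List.foldl_cons]
    obtain ⟨hp0, hplt, hpv⟩ := hmem p List.mem_cons_self
    refine ih _ target (by simpa using hlen) (fun q hq => hmem q (List.mem_cons_of_mem _ hq))
      (by simpa using hnd.of_cons) ?_
    intro j hj hnin
    by_cases hje : j = p.2.toNat
    · subst hje
      rw [List.getD_eq_getElem _ 0 (by simp only [List.length_set]; omega),
        List.getElem_set_self (by simp only [List.length_set] at *; omega)]
      exact hpv.symm
    · rw [List.getD_eq_getElem _ 0 (by simp only [List.length_set]; omega), List.getElem_set_ne (by omega),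
        ← List.getD_eq_getElem acc 0 (by omega)]
      refine hagree j hj ?_
      simp only [List.map_cons, List.mem_cons] at hnin ⊢
      push_neg
      refine ⟨?_, hnin⟩
      intro hc
      exact hje (by omega)

lemma enumP_snd_nodup (nl : List Int) : ((enumP nl).map Prod.snd).Nodup := by
  refine List.Nodup.map_on ?_ (enumP_nodup nl)
  intro x hx y hy hxy
  obtain ⟨j1, hj1, rfl⟩ := mem_enumP.1 hx
  obtain ⟨j2, hj2, rfl⟩ := mem_enumP.1 hy
  simp only at hxy
  have : j1 = j2 := by omega
  subst this
  rfl

-- ===== VERDICT (by name: the statement is the Claim_ definition above) =====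
theorem equal_distribution_spec : Claim_equal_equal_distribution := by
  intro nl w _ hpre
  unfold Spec_equal_distribution
  obtain ⟨hne, hsum⟩ := hpre
  obtain ⟨mn, hmn⟩ : ∃ v, PySem.List.min? nl (fun y => y) = some v := by
    cases h : PySem.List.min? nl (fun y => y) with
    | none => exact absurd ((PySem.List.min?_eq_none_iff nl _).1 h) hne
    | some v => exact ⟨v, rfl⟩
  obtain ⟨mx, hmx⟩ : ∃ v, PySem.List.max? nl (fun y => y) = some v := by
    cases h : PySem.List.max? nl (fun y => y) with
    | none => exact absurd ((PySem.List.max?_eq_none_iff nl _).1 h) hne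
    | some v => exact ⟨v, rfl⟩
  unfold equal_distribution equal_distribution_alt
  rw [hmn, hmx]
  obtain ⟨hsB, hpB⟩ := build_inv nl
  obtain ⟨hsF, hpF⟩ := loopAB (pvFuel nl w) w nl _ mn mx hsB hpB hmn hmx hsum
  have hlenA : (eqLoopA (pvFuel nl w) w nl mn mx).length = nl.length :=
    eqLoopA_length (pvFuel nl w) w nl mn mx
  refine (writeback _ nl (eqLoopA (pvFuel nl w) w nl mn mx) (by omega) ?_ ?_ ?_).symm
  · intro p hp
    obtain ⟨j, hj, rfl⟩ := mem_enumP.1 (hpF.mem_iff.1 hp)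
    refine ⟨by omega, by simpa using hj, ?_⟩
    simp only [Int.toNat_natCast]
    rw [List.getD_eq_getElem _ 0 hj]
  · exact ((hpF.map Prod.snd).nodup_iff).2 (enumP_snd_nodup _)
  · intro j hj hnin
    exfalso
    apply hnin
    have : ((j : Int)) ∈ (enumP (eqLoopA (pvFuel nl w) w nl mn mx)).map Prod.snd :=
      List.mem_map.2 ⟨((eqLoopA (pvFuel nl w) w nl mn mx)[j]'(by omega), (j : Int)),
        mem_enumP.2 ⟨j, by omega, rfl⟩, rfl⟩
    exact ((hpF.map Prod.snd).mem_iff).2 this
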